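-- pv_equiv track=rewrite | github.com/cafrii/omega2 | 백준/Gold/28449. 누가 이길까/누가 이길까.py | solve
-- ===== SOURCE A (Python) =====
-- import sys, bisect
--
-- def solve(Nhi:int, Narc:int, Ahi:list[int], Aarc:list[int])->list[int]:
--     '''
--     Args:
--     Returns:
--     '''
--     ans = [0]*3  # HI winner, ARC winner, draw
--     # 길이가 좀 더 긴 쪽을 이분탐색의 대상으로 하자.
--     if Nhi > Narc:
--         Ahi.sort()
--         for a in Aarc:
--             lf = bisect.bisect_left(Ahi, a)
--             rg = bisect.bisect_right(Ahi, a)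
--             ans[1] += lf # arc winner
--             ans[2] += (rg - lf)
--             ans[0] += Nhi - rg
--     else: # Nhi <= Narc
--         Aarc.sort()
--         for a in Ahi:
--             lf = bisect.bisect_left(Aarc, a)
--             rg = bisect.bisect_right(Aarc, a)
--             ans[0] += lf # hi winner
--             ans[2] += (rg - lf)
--             ans[1] += Narc - rg
--
--     return ans
-- ===== SOURCE B (Python) =====
-- def _merge_counts(L, S):
--     # L sorted ascending; S sorted ascending.
--     # Returns (sum over a in S of #{x in L : x < a},
--     #          sum over a in S of #{x in L : x <= a})
--     # via a single two-pointer sweep: i only moves forward.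
--     tlf = trg = 0
--     i = 0
--     n = len(L)
--     for a in S:
--         while i < n and L[i] < a:
--             i += 1
--         j = i
--         while j < n and L[j] == a:
--             j += 1
--         tlf += i
--         trg += j
--     return tlf, trg
--
-- def solve(Nhi: int, Narc: int, Ahi: list[int], Aarc: list[int]) -> list[int]:
--     if Nhi > Narc:
--         Ahi.sort()
--         S = sorted(Aarc)
--         tlf, trg = _merge_counts(Ahi, S)
--         return [Nhi * len(S) - trg, tlf, trg - tlf]
--     else:
--         Aarc.sort()
--         S = sorted(Ahi)
--         tlf, trg = _merge_counts(Aarc, S)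
--         return [tlf, Narc * len(S) - trg, trg - tlf]
-- ===== Notes on version B (the rewrite author's own statement) =====
-- stated objective: faster
-- what changed: Replaces the per-element binary searches (bisect_left/bisect_right on the sorted long list) by sorting the short list too and counting all three outcomes in one two-pointer merge sweep over the two sorted sequences, deriving the answer triple from the two accumulated totals.
import Mathlib
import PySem

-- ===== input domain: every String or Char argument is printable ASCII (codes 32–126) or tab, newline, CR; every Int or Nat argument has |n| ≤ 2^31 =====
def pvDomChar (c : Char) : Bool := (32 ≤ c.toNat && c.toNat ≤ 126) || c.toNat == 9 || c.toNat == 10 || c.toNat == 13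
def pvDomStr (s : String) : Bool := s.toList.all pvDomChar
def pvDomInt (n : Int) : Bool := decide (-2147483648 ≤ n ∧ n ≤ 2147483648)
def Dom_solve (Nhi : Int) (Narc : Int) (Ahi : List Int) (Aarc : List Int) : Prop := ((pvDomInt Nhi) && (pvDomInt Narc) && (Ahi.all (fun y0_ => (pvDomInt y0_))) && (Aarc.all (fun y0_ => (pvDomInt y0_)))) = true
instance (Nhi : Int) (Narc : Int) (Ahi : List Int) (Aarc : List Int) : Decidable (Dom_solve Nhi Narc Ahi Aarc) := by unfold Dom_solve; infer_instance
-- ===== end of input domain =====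

-- B replaces A's per-element binary searches with a single two-pointer merge over both sorted
-- lists (objective: alternative). Both Pythons sort the same argument list in place (A sorts the
-- branch-chosen list, B sorts that same list); the equivalence proved here is about the return value.

-- ===== PORT A =====
-- A folds over the unsorted short list, doing bisect_left/bisect_right on the sorted long list.
def solve (Nhi : Int) (Narc : Int) (Ahi : List Int) (Aarc : List Int) : List Int :=
  if Nhi > Narc then
    let L := PySem.List.sorted Ahi (fun x => x)
    let ans := Aarc.foldl (fun (ans : Int × Int × Int) a =>
      let lf := PySem.List.bisectLeft L a
      let rg := PySem.List.bisectRight L a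
      (ans.1 + (Nhi - (rg : Int)), ans.2.1 + (lf : Int), ans.2.2 + ((rg : Int) - (lf : Int)))) (0, 0, 0)
    [ans.1, ans.2.1, ans.2.2]
  else
    let L := PySem.List.sorted Aarc (fun x => x)
    let ans := Ahi.foldl (fun (ans : Int × Int × Int) a =>
      let lf := PySem.List.bisectLeft L a
      let rg := PySem.List.bisectRight L a
      (ans.1 + (lf : Int), ans.2.1 + (Narc - (rg : Int)), ans.2.2 + ((rg : Int) - (lf : Int)))) (0, 0, 0)
    [ans.1, ans.2.1, ans.2.2]

-- ===== PORT B =====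
-- Two-pointer merge: `rest` is the not-yet-passed suffix of the sorted long list, `c` the number
-- of passed elements (Python's index i); the equal run is measured by peeking, not consumed.
def mergeCounts (rest : List Int) (c : Int) (S : List Int) (tlf : Int) (trg : Int) : Int × Int :=
  match S with
  | [] => (tlf, trg)
  | a :: S' =>
    let lt := rest.takeWhile (fun x => decide (x < a))
    let rest' := rest.dropWhile (fun x => decide (x < a))
    let c' := c + (lt.length : Int)
    let eq := (rest'.takeWhile (fun x => decide (x = a))).length
    mergeCounts rest' c' S' (tlf + c') (trg + c' + (eq : Int))

def solve_alt (Nhi : Int) (Narc : Int) (Ahi : List Int) (Aarc : List Int) : List Int :=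
  if Nhi > Narc then
    let L := PySem.List.sorted Ahi (fun x => x)
    let S := PySem.List.sorted Aarc (fun x => x)
    let p := mergeCounts L 0 S 0 0
    [Nhi * (S.length : Int) - p.2, p.1, p.2 - p.1]
  else
    let L := PySem.List.sorted Aarc (fun x => x)
    let S := PySem.List.sorted Ahi (fun x => x)
    let p := mergeCounts L 0 S 0 0
    [p.1, Narc * (S.length : Int) - p.2, p.2 - p.1]

-- ===== PRECONDITION & SPEC =====
def Spec_solve (Nhi : Int) (Narc : Int) (Ahi : List Int) (Aarc : List Int) (out : List Int) : Prop := out = solve_alt Nhi Narc Ahi Aarc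
instance (Nhi : Int) (Narc : Int) (Ahi : List Int) (Aarc : List Int) (out : List Int) : Decidable (Spec_solve Nhi Narc Ahi Aarc out) := by unfold Spec_solve; infer_instance

-- ===== CLAIM (what is proved, stated in full; the proofs are below) =====
def Claim_equal_solve : Prop := ∀ (Nhi : Int) (Narc : Int) (Ahi : List Int) (Aarc : List Int), Dom_solve Nhi Narc Ahi Aarc → Spec_solve Nhi Narc Ahi Aarc (solve Nhi Narc Ahi Aarc)

-- ===== LEMMAS AND PROOFS =====

-- shorthand: number of elements of L strictly below / not above a, as lengths of takeWhile prefixes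
def twLt (L : List Int) (a : Int) : Nat := (L.takeWhile (fun x => decide (x < a))).length
def twLe (L : List Int) (a : Int) : Nat := (L.takeWhile (fun x => decide (x ≤ a))).length

theorem takeWhile_getElem_true (p : Int → Bool) (L : List Int) (j : Nat)
    (hj : j < L.length) (hlt : j < (L.takeWhile p).length) : p (L[j]) = true := by
  have hpre := List.takeWhile_prefix (l := L) p
  have he : (L.takeWhile p)[j] = L[j] := List.IsPrefix.getElem hpre hlt
  have hm : (L.takeWhile p)[j] ∈ L.takeWhile p := List.getElem_mem hlt
  have := List.mem_takeWhile_imp hm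
  rwa [he] at this

theorem takeWhile_boundary_false (p : Int → Bool) (L : List Int)
    (h : (L.takeWhile p).length < L.length) :
    p (L[(L.takeWhile p).length]'h) = false := by
  induction L with
  | nil => simp at h
  | cons x xs ih =>
    by_cases hx : p x = true
    · simp [hx] at h ⊢
      exact ih (by omega)
    · have hx' : p x = false := by
        cases hpx : p x
        · rfl
        · exact absurd hpx hx
      simp [hx']

-- a position is determined by: everything before it satisfies p, nothing from it on does
theorem pos_unique (len t1 t2 : Nat) (q : Nat → Prop)
    (h1 : t1 ≤ len) (h2 : t2 ≤ len)
    (H1 : ∀ j, j < len → (j < t1 ↔ q j)) (H2 : ∀ j, j < len → (j < t2 ↔ q j)) :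
    t1 = t2 := by
  rcases Nat.lt_trichotomy t1 t2 with h | h | h
  · have hq : q t1 := (H2 t1 (by omega)).mp h
    have : t1 < t1 := (H1 t1 (by omega)).mpr hq
    omega
  · exact h
  · have hq : q t2 := (H1 t2 (by omega)).mp h
    have : t2 < t2 := (H2 t2 (by omega)).mpr hq
    omega

theorem twLt_iff (L : List Int) (a : Int) (hL : L.Pairwise (· ≤ ·)) :
    ∀ j, (hj : j < L.length) → (j < twLt L a ↔ L[j] < a) := by
  intro j hj
  constructor
  · intro h
    have := takeWhile_getElem_true (fun x => decide (x < a)) L j hj h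
    simpa using this
  · intro h
    by_contra hcon
    have ht : twLt L a ≤ j := by omega
    have hlen : twLt L a < L.length := by omega
    have hb := takeWhile_boundary_false (fun x => decide (x < a)) L hlen
    have hle : L[twLt L a]'hlen ≤ L[j] := by
      rcases Nat.eq_or_lt_of_le ht with he | hlt
      · simp [he]
      · exact List.pairwise_iff_getElem.mp hL _ _ hlen hj hlt
    simp at hb
    have hb' : a ≤ L[twLt L a]'hlen := hb
    omega

theorem twLe_iff (L : List Int) (a : Int) (hL : L.Pairwise (· ≤ ·)) :
    ∀ j, (hj : j < L.length) → (j < twLe L a ↔ L[j] ≤ a) := by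
  intro j hj
  constructor
  · intro h
    have := takeWhile_getElem_true (fun x => decide (x ≤ a)) L j hj h
    simpa using this
  · intro h
    by_contra hcon
    have ht : twLe L a ≤ j := by omega
    have hlen : twLe L a < L.length := by omega
    have hb := takeWhile_boundary_false (fun x => decide (x ≤ a)) L hlen
    have hle : L[twLe L a]'hlen ≤ L[j] := by
      rcases Nat.eq_or_lt_of_le ht with he | hlt
      · simp [he]
      · exact List.pairwise_iff_getElem.mp hL _ _ hlen hj hlt
    simp at hb
    have hb' : a < L[twLe L a]'hlen := hb
    omega

theorem twLt_le_length (L : List Int) (a : Int) : twLt L a ≤ L.length := by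
  simpa [twLt] using List.IsPrefix.length_le (List.takeWhile_prefix _)

theorem twLe_le_length (L : List Int) (a : Int) : twLe L a ≤ L.length := by
  simpa [twLe] using List.IsPrefix.length_le (List.takeWhile_prefix _)

theorem bisectLeft_eq_twLt (L : List Int) (a : Int)
    (hL : L.Pairwise (· ≤ ·)) : PySem.List.bisectLeft L a = twLt L a := by
  obtain ⟨hle, hlo, hhi⟩ := PySem.List.bisectLeft_spec L a hL
  refine pos_unique L.length _ _ (fun j => ∃ hj : j < L.length, L[j] < a) hle (twLt_le_length L a) ?_ ?_
  · intro j hj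
    constructor
    · intro h; exact ⟨hj, hlo j hj h⟩
    · rintro ⟨hj', h⟩
      by_contra hcon
      have := hhi j hj (by omega)
      omega
  · intro j hj
    constructor
    · intro h; exact ⟨hj, (twLt_iff L a hL j hj).mp h⟩
    · rintro ⟨hj', h⟩; exact (twLt_iff L a hL j hj).mpr h

theorem bisectRight_eq_twLe (L : List Int) (a : Int)
    (hL : L.Pairwise (· ≤ ·)) : PySem.List.bisectRight L a = twLe L a := by
  obtain ⟨hle, hlo, hhi⟩ := PySem.List.bisectRight_spec L a hL
  refine pos_unique L.length _ _ (fun j => ∃ hj : j < L.length, L[j] ≤ a) hle (twLe_le_length L a) ?_ ?_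
  · intro j hj
    constructor
    · intro h; exact ⟨hj, hlo j hj h⟩
    · rintro ⟨hj', h⟩
      by_contra hcon
      have := hhi j hj (by omega)
      omega
  · intro j hj
    constructor
    · intro h; exact ⟨hj, (twLe_iff L a hL j hj).mp h⟩
    · rintro ⟨hj', h⟩; exact (twLe_iff L a hL j hj).mpr h

theorem takeWhile_append_all (p : Int → Bool) (P rest : List Int)
    (h : ∀ x ∈ P, p x = true) :
    (P ++ rest).takeWhile p = P ++ rest.takeWhile p := by
  induction P with
  | nil => simp
  | cons x xs ih =>
    have hx : p x = true := h x (by simp)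
    simp [hx, ih (fun y hy => h y (by simp [hy]))]

theorem takeWhile_le_eq_eq (a : Int) (rest : List Int) (hs : rest.Pairwise (· ≤ ·))
    (hge : ∀ y ∈ rest, a ≤ y) :
    rest.takeWhile (fun x => decide (x ≤ a)) = rest.takeWhile (fun x => decide (x = a)) := by
  induction rest with
  | nil => rfl
  | cons x xs ih =>
    have hax : a ≤ x := hge x (by simp)
    by_cases hx : x ≤ a
    · have hxa : x = a := le_antisymm hx hax
      simp [hxa, ih (List.Pairwise.sublist (List.sublist_cons_self _ _) hs)
        (fun y hy => hge y (by simp [hy]))]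
    · have hne : ¬ (x = a) := by omega
      simp [hx, hne]

theorem takeWhile_le_split (a : Int) (rest : List Int) (hs : rest.Pairwise (· ≤ ·)) :
    rest.takeWhile (fun x => decide (x ≤ a)) =
      rest.takeWhile (fun x => decide (x < a)) ++
        (rest.dropWhile (fun x => decide (x < a))).takeWhile (fun x => decide (x = a)) := by
  induction rest with
  | nil => rfl
  | cons x xs ih =>
    by_cases hx : x < a
    · simp only [List.takeWhile_cons, List.dropWhile_cons, decide_eq_true hx,
        decide_eq_true (le_of_lt hx)]
      simp [ih (List.Pairwise.sublist (List.sublist_cons_self _ _) hs)]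
    · have hd : (x :: xs).dropWhile (fun x => decide (x < a)) = x :: xs := by
        simp [hx]
      have ht : (x :: xs).takeWhile (fun x => decide (x < a)) = [] := by
        simp [hx]
      rw [hd, ht, List.nil_append]
      refine takeWhile_le_eq_eq a (x :: xs) hs ?_
      intro y hy
      rcases List.mem_cons.mp hy with rfl | hy'
      · omega
      · have := (List.pairwise_cons.mp hs).1 y hy'
        omega

theorem mergeCounts_main (S : List Int) :
    ∀ (P rest : List Int) (tlf trg : Int),
      (P ++ rest).Pairwise (· ≤ ·) → S.Pairwise (· ≤ ·) →
      (∀ x ∈ P, ∀ s ∈ S, x < s) →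
      mergeCounts rest (P.length : Int) S tlf trg =
        (tlf + (S.map (fun a => (twLt (P ++ rest) a : Int))).sum,
         trg + (S.map (fun a => (twLe (P ++ rest) a : Int))).sum) := by
  induction S with
  | nil => intro P rest tlf trg _ _ _; simp [mergeCounts]
  | cons a S' ih =>
    intro P rest tlf trg hsort hS hPS
    have hPa : ∀ x ∈ P, x < a := fun x hx => hPS x hx a (by simp)
    have hrest : rest.Pairwise (· ≤ ·) :=
      List.Pairwise.sublist ((List.sublist_append_right P rest)) hsort
    -- the strict prefix: twLt of the whole list
    have hlt_eq : twLt (P ++ rest) a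
        = P.length + (rest.takeWhile (fun x => decide (x < a))).length := by
      unfold twLt
      rw [takeWhile_append_all _ P rest (fun x hx => decide_eq_true (hPa x hx))]
      simp
    -- the weak prefix: twLe of the whole list
    have hle_eq : twLe (P ++ rest) a
        = P.length + (rest.takeWhile (fun x => decide (x < a))).length
          + ((rest.dropWhile (fun x => decide (x < a))).takeWhile (fun x => decide (x = a))).length := by
      unfold twLe
      rw [takeWhile_append_all _ P rest (fun x hx => decide_eq_true (by
        have := hPa x hx; omega))]
      rw [takeWhile_le_split a rest hrest]
      simp [Nat.add_assoc]
    -- set up the recursive call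
    set lt := rest.takeWhile (fun x => decide (x < a)) with hltdef
    set rest' := rest.dropWhile (fun x => decide (x < a)) with hrestdef
    have hsplit : P ++ rest = (P ++ lt) ++ rest' := by
      rw [List.append_assoc, hltdef, hrestdef, List.takeWhile_append_dropWhile]
    have hsort' : ((P ++ lt) ++ rest').Pairwise (· ≤ ·) := hsplit ▸ hsort
    have hPS' : ∀ x ∈ P ++ lt, ∀ s ∈ S', x < s := by
      intro x hx s hs
      have has : a ≤ s := (List.pairwise_cons.mp hS).1 s hs
      rcases List.mem_append.mp hx with hxP | hxlt
      · have := hPS x hxP s (by simp [hs]); omega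
      · have : x < a := by simpa using List.mem_takeWhile_imp hxlt
        omega
    have hrec := ih (P ++ lt) rest' (tlf + (↑P.length + ↑lt.length)) (trg + (↑P.length + ↑lt.length) + ↑(rest'.takeWhile (fun x => decide (x = a))).length) hsort' (List.Pairwise.sublist (List.sublist_cons_self _ _) hS) hPS'
    show mergeCounts rest (↑P.length) (a :: S') tlf trg = _
    rw [mergeCounts]
    have hlen : ((P ++ lt).length : Int) = ↑P.length + ↑lt.length := by
      simp
    rw [show (↑P.length + (↑lt.length : Int)) = ((P ++ lt).length : Int) by simp] at hrec ⊢
    rw [hrec]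
    rw [← hsplit, Prod.mk.injEq]
    constructor <;>
    · simp only [List.map_cons, List.sum_cons, hlt_eq, hle_eq, hlen]
      push_cast
      ring

theorem foldA1 (Nhi : Int) (L : List Int) (hL : L.Pairwise (· ≤ ·)) (T : List Int) :
    ∀ (a0 a1 a2 : Int),
      T.foldl (fun (ans : Int × Int × Int) a =>
        let lf := PySem.List.bisectLeft L a
        let rg := PySem.List.bisectRight L a
        (ans.1 + (Nhi - (rg : Int)), ans.2.1 + (lf : Int), ans.2.2 + ((rg : Int) - (lf : Int)))) (a0, a1, a2) =
      (a0 + Nhi * (T.length : Int) - (T.map (fun a => (twLe L a : Int))).sum,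
       a1 + (T.map (fun a => (twLt L a : Int))).sum,
       a2 + (T.map (fun a => (twLe L a : Int))).sum - (T.map (fun a => (twLt L a : Int))).sum) := by
  induction T with
  | nil => intro a0 a1 a2; simp
  | cons h t ih =>
    intro a0 a1 a2
    simp only [List.foldl_cons]
    rw [ih]
    rw [bisectLeft_eq_twLt L h hL, bisectRight_eq_twLe L h hL]
    simp only [List.map_cons, List.sum_cons, List.length_cons, Prod.mk.injEq]
    push_cast
    refine ⟨by ring, by ring, by ring⟩

theorem foldA2 (Narc : Int) (L : List Int) (hL : L.Pairwise (· ≤ ·)) (T : List Int) :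
    ∀ (a0 a1 a2 : Int),
      T.foldl (fun (ans : Int × Int × Int) a =>
        let lf := PySem.List.bisectLeft L a
        let rg := PySem.List.bisectRight L a
        (ans.1 + (lf : Int), ans.2.1 + (Narc - (rg : Int)), ans.2.2 + ((rg : Int) - (lf : Int)))) (a0, a1, a2) =
      (a0 + (T.map (fun a => (twLt L a : Int))).sum,
       a1 + Narc * (T.length : Int) - (T.map (fun a => (twLe L a : Int))).sum,
       a2 + (T.map (fun a => (twLe L a : Int))).sum - (T.map (fun a => (twLt L a : Int))).sum) := by
  induction T with
  | nil => intro a0 a1 a2; simp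
  | cons h t ih =>
    intro a0 a1 a2
    simp only [List.foldl_cons]
    rw [ih]
    rw [bisectLeft_eq_twLt L h hL, bisectRight_eq_twLe L h hL]
    simp only [List.map_cons, List.sum_cons, List.length_cons, Prod.mk.injEq]
    push_cast
    refine ⟨by ring, by ring, by ring⟩

theorem sum_map_perm (f : Int → Int) (xs ys : List Int) (h : xs.Perm ys) :
    (xs.map f).sum = (ys.map f).sum := by
  exact List.Perm.sum_eq (List.Perm.map f h)

-- ===== VERDICT (by name: the statement is the Claim_ definition above) =====
theorem solve_spec : Claim_equal_solve := by
  intro Nhi Narc Ahi Aarc _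
  unfold Spec_solve
  by_cases h : Narc < Nhi
  · simp only [solve, solve_alt, gt_iff_lt, if_pos h]
    have hL : (PySem.List.sorted Ahi (fun x => x)).Pairwise (· ≤ ·) :=
      PySem.List.sorted_pairwise Ahi (fun x => x)
    have hS : (PySem.List.sorted Aarc (fun x => x)).Pairwise (· ≤ ·) :=
      PySem.List.sorted_pairwise Aarc (fun x => x)
    rw [foldA1 Nhi _ hL Aarc 0 0 0]
    have hm := mergeCounts_main (PySem.List.sorted Aarc (fun x => x)) []
      (PySem.List.sorted Ahi (fun x => x)) 0 0 (by simpa using hL) hS (by simp)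
    simp only [List.nil_append, List.length_nil, Nat.cast_zero] at hm
    rw [hm]
    have hperm : (PySem.List.sorted Aarc (fun x => x)).Perm Aarc :=
      PySem.List.sorted_perm Aarc (fun x => x) false
    have h1 := sum_map_perm (fun a => (twLt (PySem.List.sorted Ahi (fun x => x)) a : Int)) _ _ hperm
    have h2 := sum_map_perm (fun a => (twLe (PySem.List.sorted Ahi (fun x => x)) a : Int)) _ _ hperm
    have hlen : (PySem.List.sorted Aarc (fun x => x)).length = Aarc.length := hperm.length_eq
    simp only [List.cons.injEq, and_true]
    refine ⟨by rw [← h2, hlen]; ring, by rw [← h1], by rw [← h1, ← h2]; ring⟩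
  · simp only [solve, solve_alt, gt_iff_lt, if_neg h]
    have hL : (PySem.List.sorted Aarc (fun x => x)).Pairwise (· ≤ ·) :=
      PySem.List.sorted_pairwise Aarc (fun x => x)
    have hS : (PySem.List.sorted Ahi (fun x => x)).Pairwise (· ≤ ·) :=
      PySem.List.sorted_pairwise Ahi (fun x => x)
    rw [foldA2 Narc _ hL Ahi 0 0 0]
    have hm := mergeCounts_main (PySem.List.sorted Ahi (fun x => x)) []
      (PySem.List.sorted Aarc (fun x => x)) 0 0 (by simpa using hL) hS (by simp)
    simp only [List.nil_append, List.length_nil, Nat.cast_zero] at hm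
    rw [hm]
    have hperm : (PySem.List.sorted Ahi (fun x => x)).Perm Ahi :=
      PySem.List.sorted_perm Ahi (fun x => x) false
    have h1 := sum_map_perm (fun a => (twLt (PySem.List.sorted Aarc (fun x => x)) a : Int)) _ _ hperm
    have h2 := sum_map_perm (fun a => (twLe (PySem.List.sorted Aarc (fun x => x)) a : Int)) _ _ hperm
    have hlen : (PySem.List.sorted Ahi (fun x => x)).length = Ahi.length := hperm.length_eq
    simp only [List.cons.injEq, and_true]
    refine ⟨by rw [← h1], by rw [← h2, hlen]; ring, by rw [← h1, ← h2]; ring⟩
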